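-- pv_equiv track=rewrite | github.com/jwiegley/scripts | number_paragraphs.py | parse_paragraphs
-- ===== SOURCE A (Python) =====
-- from typing import Dict, List, Optional, Tuple, Union
--
-- def is_separator_line(line: str) -> bool:
--     """
--     Check if a line is a separator (e.g., '-----').
--
--     A line is considered a separator if it consists only of dashes
--     and/or whitespace.
--
--     Args:
--         line: The line to check
--
--     Returns:
--         True if the line is a separator, False otherwise
--     """
--     stripped = line.strip()
--     return bool(stripped) and all(c == '-' for c in stripped)
--
-- def should_number_paragraph(paragraph_lines: List[str]) -> bool:
--     """
--     Determine if a paragraph should be numbered.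
--
--     A paragraph should NOT be numbered if:
--     1. It has up to 5 lines in the original input
--     2. AND the last line does NOT end with a period
--
--     Args:
--         paragraph_lines: List of lines in the paragraph (original, unwrapped)
--
--     Returns:
--         True if the paragraph should be numbered, False otherwise
--     """
--     if not paragraph_lines:
--         return True
--
--     # Check if paragraph has up to 5 lines
--     if len(paragraph_lines) > 5:
--         return True
--
--     # Check if last line ends with a period
--     last_line = paragraph_lines[-1].rstrip()
--     if last_line.endswith('.'):
--         return True
--
--     # Short paragraph without ending period - don't number
--     return False
--
-- def parse_paragraphs(lines: List[str]) -> List[Tuple[Union[str, None], bool, bool]]: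
--     """
--     Parse input lines into paragraphs and separators.
--
--     Args:
--         lines: List of input lines
--
--     Returns:
--         List of tuples (content, is_separator, should_number) where:
--         - content is the paragraph text (joined) or separator line
--         - is_separator indicates if this is a separator line
--         - should_number indicates if this paragraph should be numbered
--     """
--     paragraphs: List[Tuple[Union[str, None], bool, bool]] = []
--     current_paragraph: List[str] = []
--
--     for line in lines:
--         stripped = line.rstrip()
--
--         # Check if this is a separator line
--         if is_separator_line(stripped):
--             # Save any accumulated paragraph first
--             if current_paragraph:
--                 paragraph_text = ' '.join(current_paragraph)
--                 # Check if paragraph should be numbered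
--                 should_number = should_number_paragraph(current_paragraph)
--                 paragraphs.append((paragraph_text, False, should_number))
--                 current_paragraph = []
--
--             # Add the separator (separators are never numbered)
--             paragraphs.append((stripped, True, False))
--
--         # Blank line - end of paragraph
--         elif not stripped:
--             if current_paragraph:
--                 paragraph_text = ' '.join(current_paragraph)
--                 # Check if paragraph should be numbered
--                 should_number = should_number_paragraph(current_paragraph)
--                 paragraphs.append((paragraph_text, False, should_number))
--                 current_paragraph = []
--
--         # Regular text line - accumulate into current paragraph
--         else:
--             current_paragraph.append(stripped)
--
--     # Don't forget the last paragraph if there is one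
--     if current_paragraph:
--         paragraph_text = ' '.join(current_paragraph)
--         # Check if paragraph should be numbered
--         should_number = should_number_paragraph(current_paragraph)
--         paragraphs.append((paragraph_text, False, should_number))
--
--     return paragraphs
-- ===== SOURCE B (Python) =====
-- from typing import List, Tuple, Union
--
-- def is_separator_line(line: str) -> bool:
--     stripped = line.strip()
--     return bool(stripped) and all(c == '-' for c in stripped)
--
-- def should_number_paragraph(paragraph_lines: List[str]) -> bool:
--     if not paragraph_lines:
--         return True
--     if len(paragraph_lines) > 5:
--         return True
--     if paragraph_lines[-1].rstrip().endswith('.'):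
--         return True
--     return False
--
-- def parse_paragraphs(lines: List[str]) -> List[Tuple[Union[str, None], bool, bool]]:
--     """Partition-then-map: rstrip every line, classify it (separator / blank /
--     text), cut the list into maximal runs of one class, and emit each run."""
--     def classify(s: str) -> int:
--         if is_separator_line(s):
--             return 0
--         return 1 if not s else 2
--
--     stripped = [ln.rstrip() for ln in lines]
--     out: List[Tuple[Union[str, None], bool, bool]] = []
--     i, n = 0, len(stripped)
--     while i < n:
--         k = classify(stripped[i])
--         j = i + 1
--         while j < n and classify(stripped[j]) == k:
--             j += 1
--         run = stripped[i:j]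
--         if k == 2:
--             out.append((' '.join(run), False, should_number_paragraph(run)))
--         elif k == 0:
--             out.extend((s, True, False) for s in run)
--         i = j
--     return out
-- ===== Notes on version B (the rewrite author's own statement) =====
-- stated objective: alternative
-- what changed: Replaced A's single pass with a mutable current-paragraph accumulator and flush-at-boundary logic by a partition-then-map decomposition: classify every rstripped line, cut the input into maximal runs of one class, and emit each run (join text runs, emit separator lines individually, drop blank runs).
import Mathlib
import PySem

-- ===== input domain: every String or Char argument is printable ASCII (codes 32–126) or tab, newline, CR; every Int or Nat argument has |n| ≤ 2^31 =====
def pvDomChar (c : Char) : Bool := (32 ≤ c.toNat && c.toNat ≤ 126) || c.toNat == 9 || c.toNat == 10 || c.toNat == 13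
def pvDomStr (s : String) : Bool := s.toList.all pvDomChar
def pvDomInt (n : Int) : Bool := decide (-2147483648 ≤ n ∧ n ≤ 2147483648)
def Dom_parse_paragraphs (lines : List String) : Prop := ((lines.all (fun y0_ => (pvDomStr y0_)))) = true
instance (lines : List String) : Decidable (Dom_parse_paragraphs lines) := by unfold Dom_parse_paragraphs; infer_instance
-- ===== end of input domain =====

-- B replaces A's accumulator-with-flushes single pass by a partition-then-map
-- decomposition (classify each rstripped line, cut into maximal runs, emit each run).

-- ===== PORT A =====
-- shared module helper: is_separator_line
def is_separator_line (line : String) : Bool :=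
  let stripped := PySem.Str.strip line
  (!(stripped = "")) && stripped.toList.all (fun c => c == '-')

-- shared module helper: should_number_paragraph
def should_number_paragraph (paragraph_lines : List String) : Bool :=
  match paragraph_lines with
  | [] => true
  | _ :: _ =>
    if paragraph_lines.length > 5 then true
    else
      let last_line := PySem.Str.rstrip (paragraph_lines.getLast! )
      if PySem.Str.endswith last_line "." then true
      else false

-- one element of the result list
def pvFlushA (cur : List String) : List (Option String × Bool × Bool) :=
  if cur ≠ [] then
    [(some (PySem.Str.join " " cur), false, should_number_paragraph cur)]
  else []

def pvStepA (st : List (Option String × Bool × Bool) × List String) (line : String) :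
    List (Option String × Bool × Bool) × List String :=
  let stripped := PySem.Str.rstrip line
  if is_separator_line stripped then
    (st.1 ++ pvFlushA st.2 ++ [(some stripped, true, false)], [])
  else if stripped = "" then
    (st.1 ++ pvFlushA st.2, [])
  else
    (st.1, st.2 ++ [stripped])

def parse_paragraphs (lines : List String) : List (Option String × Bool × Bool) :=
  let st := lines.foldl pvStepA ([], [])
  st.1 ++ pvFlushA st.2

-- ===== PORT B =====
def pvClassify (s : String) : Nat :=
  if is_separator_line s then 0
  else if s = "" then 1 else 2

-- cut an (already rstripped) list into maximal runs of one class
def pvRuns : List String → List (Nat × List String)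
  | [] => []
  | s :: rest =>
    let k := pvClassify s
    (k, s :: rest.takeWhile (fun t => pvClassify t == k)) ::
      pvRuns (rest.dropWhile (fun t => pvClassify t == k))
termination_by l => l.length
decreasing_by
  simp only [List.length_cons]
  exact Nat.lt_succ_of_le (List.length_dropWhile_le _ _)

def pvEmit (k : Nat) (run : List String) : List (Option String × Bool × Bool) :=
  if k = 2 then [(some (PySem.Str.join " " run), false, should_number_paragraph run)]
  else if k = 0 then run.map (fun s => (some s, true, false))
  else []

def parse_paragraphs_alt (lines : List String) : List (Option String × Bool × Bool) :=
  (pvRuns (lines.map PySem.Str.rstrip)).foldl (fun out kr => out ++ pvEmit kr.1 kr.2) []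

-- ===== PRECONDITION & SPEC =====
def Spec_parse_paragraphs (lines : List String) (out : List (Option String × Bool × Bool)) : Prop := out = parse_paragraphs_alt lines
instance (lines : List String) (out : List (Option String × Bool × Bool)) : Decidable (Spec_parse_paragraphs lines out) := by unfold Spec_parse_paragraphs; infer_instance

-- ===== CLAIM (what is proved, stated in full; the proofs are below) =====
def Claim_equal_parse_paragraphs : Prop := ∀ (lines : List String), Dom_parse_paragraphs lines → Spec_parse_paragraphs lines (parse_paragraphs lines)

-- ===== LEMMAS AND PROOFS =====

-- mid-level recursion: A's loop on already-stripped lines, with pending paragraph cur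
def pvGo : List String → List String → List (Option String × Bool × Bool)
  | cur, [] => pvFlushA cur
  | cur, s :: rest =>
    if is_separator_line s then pvFlushA cur ++ (some s, true, false) :: pvGo [] rest
    else if s = "" then pvFlushA cur ++ pvGo [] rest
    else pvGo (cur ++ [s]) rest

-- A equals pvGo
theorem pvA_go (ls : List String) (acc : List (Option String × Bool × Bool)) (cur : List String) :
    (ls.foldl pvStepA (acc, cur)).1 ++ pvFlushA (ls.foldl pvStepA (acc, cur)).2
      = acc ++ pvGo cur (ls.map PySem.Str.rstrip) := by
  induction ls generalizing acc cur with
  | nil => simp [pvGo]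
  | cons l ls ih =>
    simp only [List.foldl_cons, List.map_cons]
    by_cases h1 : is_separator_line (PySem.Str.rstrip l)
    · rw [show pvStepA (acc, cur) l
          = (acc ++ pvFlushA cur ++ [(some (PySem.Str.rstrip l), true, false)], [])
          from by simp [pvStepA, h1], ih]
      simp [pvGo, h1]
    · have hsep : is_separator_line "" = false := by decide
      by_cases h2 : PySem.Str.rstrip l = ""
      · rw [show pvStepA (acc, cur) l = (acc ++ pvFlushA cur, []) from by
            simp [pvStepA, h2, hsep], ih]
        simp [pvGo, h2, hsep]
      · rw [show pvStepA (acc, cur) l = (acc, cur ++ [PySem.Str.rstrip l]) from by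
            simp [pvStepA, h1, h2], ih]
        simp [pvGo, h1, h2]

-- pvGo swallows a text run into cur
theorem pvGo_text (run : List String) (h : ∀ s ∈ run, pvClassify s = 2) :
    ∀ cur tail, pvGo cur (run ++ tail) = pvGo (cur ++ run) tail := by
  induction run with
  | nil => simp
  | cons s xs ih =>
    intro cur tail
    have hs := h s (by simp)
    have h1 : is_separator_line s = false := by
      by_contra hc
      simp [pvClassify, eq_true_of_ne_false hc] at hs
    have h2 : s ≠ "" := by
      intro hc
      simp [pvClassify, hc, show is_separator_line "" = false from by decide] at hs
    simp only [List.cons_append, pvGo, h1, Bool.false_eq_true, if_false, h2]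
    rw [ih (fun t ht => h t (by simp [ht])) (cur ++ [s]) tail]
    simp

-- flushing a nonempty cur when the next line (if any) is not text
theorem pvGo_flush (cur tail : List String)
    (h : tail = [] ∨ ∃ t ts, tail = t :: ts ∧ pvClassify t ≠ 2) :
    pvGo cur tail = pvFlushA cur ++ pvGo [] tail := by
  rcases h with h | ⟨t, ts, rfl, ht⟩
  · simp [h, pvGo, pvFlushA]
  · by_cases h1 : is_separator_line t
    · simp [pvGo, h1, pvFlushA]
    · have h2 : t = "" := by
        by_contra hc
        simp [pvClassify, h1, hc] at ht
      simp [pvGo, h2, pvFlushA, show is_separator_line "" = false from by decide]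

-- a separator run emits its lines one by one
theorem pvGo_sep (run : List String) (h : ∀ s ∈ run, pvClassify s = 0) :
    ∀ tail, pvGo [] (run ++ tail)
      = run.map (fun s => (some s, true, false)) ++ pvGo [] tail := by
  induction run with
  | nil => simp
  | cons s xs ih =>
    intro tail
    have hs := h s (by simp)
    have h1 : is_separator_line s = true := by
      by_contra hc
      simp only [pvClassify, eq_false_of_ne_true hc, Bool.false_eq_true, if_false] at hs
      split at hs <;> omega
    simp [pvGo, h1, pvFlushA, ih (fun t ht => h t (by simp [ht])) tail]

-- a blank run emits nothing
theorem pvGo_blank (run : List String) (h : ∀ s ∈ run, pvClassify s = 1) :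
    ∀ tail, pvGo [] (run ++ tail) = pvGo [] tail := by
  induction run with
  | nil => simp
  | cons s xs ih =>
    intro tail
    have hs := h s (by simp)
    have h1 : is_separator_line s = false := by
      by_contra hc
      simp [pvClassify, eq_true_of_ne_false hc] at hs
    have h2 : s = "" := by
      by_contra hc
      simp [pvClassify, h1, hc] at hs
    simp [pvGo, h2, pvFlushA, show is_separator_line "" = false from by decide,
      ih (fun t ht => h t (by simp [ht])) tail]

-- B's run fold equals pvGo
theorem pvB_go (ls : List String) :
    ∀ acc, (pvRuns ls).foldl (fun out kr => out ++ pvEmit kr.1 kr.2) acc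
      = acc ++ pvGo [] ls := by
  induction hn : ls.length using Nat.strong_induction_on generalizing ls with
  | _ n ih =>
  match ls with
  | [] => intro acc; simp [pvRuns, pvGo, pvFlushA]
  | s :: rest =>
    intro acc
    have hsplit : s :: rest
        = (s :: rest.takeWhile (fun t => pvClassify t == pvClassify s))
          ++ rest.dropWhile (fun t => pvClassify t == pvClassify s) := by
      rw [List.cons_append, List.takeWhile_append_dropWhile]
    have hlen : (rest.dropWhile (fun t => pvClassify t == pvClassify s)).length < n := by
      subst hn
      simp only [List.length_cons]
      exact Nat.lt_succ_of_le (List.length_dropWhile_le _ _)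
    have hallrun : ∀ t ∈ s :: rest.takeWhile (fun t => pvClassify t == pvClassify s),
        pvClassify t = pvClassify s := by
      intro t ht
      rcases List.mem_cons.mp ht with rfl | ht
      · rfl
      · simpa using List.mem_takeWhile_imp ht
    have htailhead : rest.dropWhile (fun t => pvClassify t == pvClassify s) = []
        ∨ ∃ t ts, rest.dropWhile (fun t => pvClassify t == pvClassify s) = t :: ts
            ∧ pvClassify t ≠ pvClassify s := by
      have hh := List.head?_dropWhile_not (fun t => pvClassify t == pvClassify s) rest
      match htl : rest.dropWhile (fun t => pvClassify t == pvClassify s) with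
      | [] => exact Or.inl rfl
      | t :: ts =>
        rw [htl] at hh
        exact Or.inr ⟨t, ts, rfl, by simpa using hh⟩
    have hgoal : pvGo [] (s :: rest)
        = pvEmit (pvClassify s) (s :: rest.takeWhile (fun t => pvClassify t == pvClassify s))
          ++ pvGo [] (rest.dropWhile (fun t => pvClassify t == pvClassify s)) := by
      by_cases hsep : is_separator_line s
      · have hk : pvClassify s = 0 := by simp [pvClassify, hsep]
        rw [hsplit, pvGo_sep _ (by intro t ht; rw [hallrun t ht, hk])]
        simp [pvEmit, hk]
      · by_cases hemp : s = ""
        · have hk : pvClassify s = 1 := by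
            simp [pvClassify, hemp, show is_separator_line "" = false from by decide]
          rw [hsplit, pvGo_blank _ (by intro t ht; rw [hallrun t ht, hk])]
          simp [pvEmit, hk]
        · have hk : pvClassify s = 2 := by simp [pvClassify, hsep, hemp]
          rw [hsplit, pvGo_text _ (by intro t ht; rw [hallrun t ht, hk]) [] _,
            List.nil_append,
            pvGo_flush _ _ (by
              rcases htailhead with h | ⟨t, ts, heq, hne⟩
              · exact Or.inl h
              · exact Or.inr ⟨t, ts, heq, by rw [hk] at hne; exact hne⟩)]
          simp [pvEmit, hk, pvFlushA]
    rw [pvRuns]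
    simp only [List.foldl_cons]
    rw [ih _ hlen _ rfl, hgoal, List.append_assoc]

-- ===== VERDICT (by name: the statement is the Claim_ definition above) =====
theorem parse_paragraphs_spec : Claim_equal_parse_paragraphs := by
  intro lines _
  unfold Spec_parse_paragraphs parse_paragraphs parse_paragraphs_alt
  rw [pvB_go, pvA_go]
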